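-- pv_equiv track=rewrite | github.com/taylorperkins/aoc-2023 | day15/part2.py | hash_value
-- ===== SOURCE A (Python) =====
-- def hash_value(s: str, acc: int = 0):
--     if not s:
--         return acc
--
--     c = s[0]
--     acc += ord(c)
--     acc *= 17
--     acc %= 256
--
--     return hash_value(s[1:], acc)
-- ===== SOURCE B (Python) =====
-- def hash_value(s: str, acc: int = 0):
--     for c in s:
--         acc = (acc + ord(c)) * 17 % 256
--     return acc
-- ===== Notes on version B (the rewrite author's own statement) =====
-- stated objective: idiomatic
-- what changed: Replaced the tail recursion with slicing (s[1:]) by a direct for loop over the characters maintaining the accumulator.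
import Mathlib
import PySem

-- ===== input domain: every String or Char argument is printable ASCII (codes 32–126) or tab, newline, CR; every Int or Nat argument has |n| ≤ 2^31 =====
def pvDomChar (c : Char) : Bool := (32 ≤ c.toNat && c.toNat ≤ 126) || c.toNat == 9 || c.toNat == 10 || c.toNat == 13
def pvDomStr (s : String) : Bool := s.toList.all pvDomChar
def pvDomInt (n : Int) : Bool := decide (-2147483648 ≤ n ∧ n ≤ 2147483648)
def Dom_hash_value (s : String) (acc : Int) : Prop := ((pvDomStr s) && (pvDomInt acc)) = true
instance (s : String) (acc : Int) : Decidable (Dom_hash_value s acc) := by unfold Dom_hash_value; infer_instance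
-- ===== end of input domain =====

-- B iterates over the characters with a fold instead of A's tail recursion on string slices.


-- ===== PORT A =====
-- A recurses: if s is empty return acc, else fold in ord(s[0]) and recurse on s[1:].
def hash_value_rec (l : List Char) (acc : Int) : Int :=
  match l with
  | [] => acc
  | c :: rest => hash_value_rec rest (PySem.Int.mod ((acc + (c.toNat : Int)) * 17) 256)

def hash_value (s : String) (acc : Int) : Int := hash_value_rec s.toList acc

-- ===== PORT B =====
-- B: a for loop over the characters maintaining acc (a left fold).
def hash_value_alt (s : String) (acc : Int) : Int :=
  s.toList.foldl (fun a c => PySem.Int.mod ((a + (c.toNat : Int)) * 17) 256) acc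

-- ===== PRECONDITION & SPEC =====
def Spec_hash_value (s : String) (acc : Int) (out : Int) : Prop := out = hash_value_alt s acc
instance (s : String) (acc : Int) (out : Int) : Decidable (Spec_hash_value s acc out) := by unfold Spec_hash_value; infer_instance

-- ===== CLAIM (what is proved, stated in full; the proofs are below) =====
def Claim_equal_hash_value : Prop := ∀ (s : String) (acc : Int), Dom_hash_value s acc → Spec_hash_value s acc (hash_value s acc)

-- ===== LEMMAS AND PROOFS =====
theorem hash_value_rec_eq_foldl (l : List Char) (acc : Int) :
    hash_value_rec l acc =
      l.foldl (fun a c => PySem.Int.mod ((a + (c.toNat : Int)) * 17) 256) acc := by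
  induction l generalizing acc with
  | nil => rfl
  | cons c rest ih => simp [hash_value_rec, List.foldl, ih]

-- ===== VERDICT (by name: the statement is the Claim_ definition above) =====
theorem hash_value_spec : Claim_equal_hash_value := by
  intro s acc _
  unfold Spec_hash_value hash_value hash_value_alt
  exact hash_value_rec_eq_foldl _ _
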